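-- pv_equiv track=rewrite | github.com/Nitorac/AdventOfCode-2023 | Day2/day2.py | is_valid_game_part1
-- ===== SOURCE A (Python) =====
-- QUESTION_PART1 = {"red": 12, "green": 13, "blue": 14}
--
-- def is_valid_game_part1(mgame):
--     for mcubes in mgame:
--         if (
--                 mcubes.get("red", 0) > QUESTION_PART1["red"] or
--                 mcubes.get("blue", 0) > QUESTION_PART1["blue"] or
--                 mcubes.get("green", 0) > QUESTION_PART1["green"]
--         ):
--             return False
--     return True
-- ===== SOURCE B (Python) =====
-- QUESTION_PART1 = {"red": 12, "green": 13, "blue": 14}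
--
-- def is_valid_game_part1(mgame):
--     maxes = {"red": 0, "green": 0, "blue": 0}
--     for mcubes in mgame:
--         for c in maxes:
--             maxes[c] = max(maxes[c], mcubes.get(c, 0))
--     return all(maxes[c] <= QUESTION_PART1[c] for c in maxes)
-- ===== Notes on version B (the rewrite author's own statement) =====
-- stated objective: alternative
-- what changed: B replaces A's short-circuit per-draw threshold check with an aggregate-then-compare pass: it first folds the whole game into a table of per-color running maxima and only then compares each maximum against the limits.
import Mathlib
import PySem

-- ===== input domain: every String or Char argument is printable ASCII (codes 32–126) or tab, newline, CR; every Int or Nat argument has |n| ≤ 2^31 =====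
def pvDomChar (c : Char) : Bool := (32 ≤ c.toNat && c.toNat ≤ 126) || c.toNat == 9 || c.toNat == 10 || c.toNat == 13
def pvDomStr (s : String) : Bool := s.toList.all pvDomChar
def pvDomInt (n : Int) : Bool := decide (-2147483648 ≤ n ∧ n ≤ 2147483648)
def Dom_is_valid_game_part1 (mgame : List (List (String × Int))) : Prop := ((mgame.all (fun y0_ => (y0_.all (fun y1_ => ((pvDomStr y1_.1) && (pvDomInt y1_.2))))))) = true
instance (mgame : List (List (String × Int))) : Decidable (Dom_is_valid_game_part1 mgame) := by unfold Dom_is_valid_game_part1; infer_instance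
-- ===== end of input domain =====

-- B replaces A's short-circuit per-draw threshold check by an aggregate-then-compare pass
-- (fold the whole game into a per-color running-maxima table, then compare against the limits);
-- same O(n) cost, different decomposition.

-- QUESTION_PART1 = {"red": 12, "green": 13, "blue": 14}
def QUESTION_PART1 : PySem.Dict String Int :=
  PySem.Dict.ofList [("red", 12), ("green", 13), ("blue", 14)]

-- ===== PORT A =====
-- QUESTION_PART1["red"] etc.: the keys are present in the literal dict, so the lookup
-- cannot raise; ported as getD with default 0 (never used).
def is_valid_game_part1 (mgame : List (List (String × Int))) : Bool :=
  match mgame with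
  | [] => true
  | mcubes :: rest =>
    if ((PySem.Dict.ofList mcubes).getD "red" 0 > QUESTION_PART1.getD "red" 0 ||
        (PySem.Dict.ofList mcubes).getD "blue" 0 > QUESTION_PART1.getD "blue" 0 ||
        (PySem.Dict.ofList mcubes).getD "green" 0 > QUESTION_PART1.getD "green" 0) then
      false
    else is_valid_game_part1 rest

-- ===== PORT B =====
-- maxes[c] = max(maxes[c], mcubes.get(c, 0)) for each key c of maxes (keys never change)
def pvStepB (maxes : PySem.Dict String Int) (mcubes : List (String × Int)) : PySem.Dict String Int :=
  maxes.keys.foldl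
    (fun m c => m.insert c (max (m.getD c 0) ((PySem.Dict.ofList mcubes).getD c 0))) maxes

def is_valid_game_part1_alt (mgame : List (List (String × Int))) : Bool :=
  let maxes0 : PySem.Dict String Int := PySem.Dict.ofList [("red", 0), ("green", 0), ("blue", 0)]
  let maxes := mgame.foldl pvStepB maxes0
  maxes.keys.all (fun c => maxes.getD c 0 ≤ QUESTION_PART1.getD c 0)

-- ===== PRECONDITION & SPEC =====
def Spec_is_valid_game_part1 (mgame : List (List (String × Int))) (out : Bool) : Prop := out = is_valid_game_part1_alt mgame
instance (mgame : List (List (String × Int))) (out : Bool) : Decidable (Spec_is_valid_game_part1 mgame out) := by unfold Spec_is_valid_game_part1; infer_instance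

-- ===== CLAIM (what is proved, stated in full; the proofs are below) =====
def Claim_equal_is_valid_game_part1 : Prop := ∀ (mgame : List (List (String × Int))), Dom_is_valid_game_part1 mgame → Spec_is_valid_game_part1 mgame (is_valid_game_part1 mgame)

-- ===== LEMMAS AND PROOFS =====

theorem pvQ_red : QUESTION_PART1.getD "red" 0 = 12 := by decide
theorem pvQ_green : QUESTION_PART1.getD "green" 0 = 13 := by decide
theorem pvQ_blue : QUESTION_PART1.getD "blue" 0 = 14 := by decide

-- a three-entry literal dict in raw form
theorem pvOfList_lit (r g b : Int) :
    PySem.Dict.ofList [("red", r), ("green", g), ("blue", b)] =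
      PySem.Dict.mk [("red", r), ("green", g), ("blue", b)] := by
  apply PySem.Dict.ext
  simp [PySem.Dict.ofList, PySem.Dict.update, PySem.Dict.insert, PySem.Dict.empty,
        PySem.Dict.contains]

-- one B-step on a maxima table in raw form yields a maxima table in raw form
theorem pvStepB_mk (r g b : Int) (mcubes : List (String × Int)) :
    pvStepB (PySem.Dict.mk [("red", r), ("green", g), ("blue", b)]) mcubes =
      PySem.Dict.mk
        [("red", max r ((PySem.Dict.ofList mcubes).getD "red" 0)),
         ("green", max g ((PySem.Dict.ofList mcubes).getD "green" 0)),
         ("blue", max b ((PySem.Dict.ofList mcubes).getD "blue" 0))] := by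
  apply PySem.Dict.ext
  simp [pvStepB, List.foldl, PySem.Dict.insert, PySem.Dict.contains, PySem.Dict.getD,
        PySem.Dict.get?]

-- unfolding A one step, with the constant lookups evaluated
theorem pvA_cons (h : List (String × Int)) (t : List (List (String × Int))) :
    is_valid_game_part1 (h :: t) =
      if ((PySem.Dict.ofList h).getD "red" 0 > 12 ||
          (PySem.Dict.ofList h).getD "blue" 0 > 14 ||
          (PySem.Dict.ofList h).getD "green" 0 > 13) then false
      else is_valid_game_part1 t := by
  simp only [is_valid_game_part1]
  rw [pvQ_red, pvQ_green, pvQ_blue]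

theorem pvDecide_lt (a b : Int) : decide (b < a) = !decide (a ≤ b) := by
  rcases lt_or_ge b a with h | h
  · simp [h, not_le.mpr h]
  · simp [not_lt.mpr h, h]

-- loop invariant: the final check on the fold started from maxima (r, g, b) is the
-- bound check on (r, g, b) together with A's verdict on the remaining game
set_option maxHeartbeats 1000000 in
theorem pvFold_inv (mgame : List (List (String × Int))) : ∀ (r g b : Int),
    (let maxes := mgame.foldl pvStepB (PySem.Dict.mk [("red", r), ("green", g), ("blue", b)])
     maxes.keys.all (fun c => maxes.getD c 0 ≤ QUESTION_PART1.getD c 0)) =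
      (decide (r ≤ 12) && decide (g ≤ 13) && decide (b ≤ 14) && is_valid_game_part1 mgame) := by
  induction mgame with
  | nil =>
    intro r g b
    simp [is_valid_game_part1, PySem.Dict.getD, PySem.Dict.get?, QUESTION_PART1,
          PySem.Dict.ofList, PySem.Dict.update, PySem.Dict.insert, PySem.Dict.empty,
          PySem.Dict.contains, List.foldl, Bool.and_assoc]
  | cons h t ih =>
    intro r g b
    simp only [List.foldl_cons, pvStepB_mk, ih, pvA_cons, pvDecide_lt]
    generalize (PySem.Dict.ofList h).getD "red" 0 = hr
    generalize (PySem.Dict.ofList h).getD "green" 0 = hg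
    generalize (PySem.Dict.ofList h).getD "blue" 0 = hb
    by_cases h1 : hr ≤ 12 <;> by_cases h2 : hg ≤ 13 <;> by_cases h3 : hb ≤ 14 <;>
      by_cases h4 : r ≤ 12 <;> by_cases h5 : g ≤ 13 <;> by_cases h6 : b ≤ 14 <;>
      simp_all [sup_le_iff]

-- ===== VERDICT (by name: the statement is the Claim_ definition above) =====
theorem is_valid_game_part1_spec : Claim_equal_is_valid_game_part1 := by
  intro mgame _
  unfold Spec_is_valid_game_part1 is_valid_game_part1_alt
  rw [pvOfList_lit, pvFold_inv mgame 0 0 0]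
  simp
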